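-- pv_equiv track=rewrite | github.com/scor728/Heavy-Hitters | 753_A4_scor728.py | misra_gries
-- ===== SOURCE A (Python) =====
-- def misra_gries(words, k):
--     summary_object = {}
--     decrement_count = 0
--
--     for word in words:
--         if word in summary_object: # Word exists in summary
--             summary_object[word] += 1
--
--         elif len(summary_object) < k: # Summary is not full yet
--             summary_object[word] = 1
--
--         else: # Summary is full
--
--             # Decrement every word count
--             decrement_count += 1
--             for key in list(summary_object.keys()):
--                 summary_object[key] -= 1
--
--                 # Remove words with count 0
--                 if summary_object[key] == 0:
--                     del summary_object[key]
--
--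
--     # Adjust summary counts to given scale
--     scale_factor = len(words) // k
--     for key in summary_object:
--         summary_object[key] *= scale_factor
--
--     return summary_object, decrement_count
-- ===== SOURCE B (Python) =====
-- def misra_gries(words, k):
--     # Count-indexed buckets over a global offset: stored[w] - offset is the true count.
--     # The overflow step pops exactly the one bucket of counters that reach zero,
--     # so no per-key decrement sweep over the whole summary is ever performed.
--     stored = {}          # word -> stored count (true count + offset)
--     buckets = {}         # stored count -> set of words currently at that stored count
--     offset = 0
--     for word in words:
--         if word in stored:
--             c = stored[word]
--             stored[word] = c + 1
--             buckets[c].discard(word)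
--             buckets.setdefault(c + 1, set()).add(word)
--         elif len(stored) < k:
--             stored[word] = offset + 1
--             buckets.setdefault(offset + 1, set()).add(word)
--         else:
--             offset += 1
--             for w in buckets.pop(offset, set()):
--                 del stored[w]
--     scale = len(words) // k
--     return {w: (s - offset) * scale for w, s in stored.items()}, offset
-- ===== Notes on version B (the rewrite author's own statement) =====
-- stated objective: alternative
-- what changed: B maintains a count-indexed bucket dictionary over a global offset (stored[w] = true count + offset), so the full-summary case is one offset bump plus popping the single bucket of words whose count reaches zero, instead of A's decrement-and-delete sweep that rewrites every counter in the summary.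
import Mathlib
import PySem

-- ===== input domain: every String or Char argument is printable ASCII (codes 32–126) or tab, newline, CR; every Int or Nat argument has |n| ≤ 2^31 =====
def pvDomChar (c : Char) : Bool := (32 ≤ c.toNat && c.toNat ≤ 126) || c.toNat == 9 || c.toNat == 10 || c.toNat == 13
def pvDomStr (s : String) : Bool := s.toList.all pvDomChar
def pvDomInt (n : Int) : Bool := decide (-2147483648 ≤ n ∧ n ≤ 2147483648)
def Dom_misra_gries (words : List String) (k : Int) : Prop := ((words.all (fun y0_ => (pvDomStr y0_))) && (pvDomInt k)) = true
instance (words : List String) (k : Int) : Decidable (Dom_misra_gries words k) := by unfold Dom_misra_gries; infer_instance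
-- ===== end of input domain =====

-- B maintains count-indexed buckets over a global offset: the full-summary case pops the one
-- bucket of counters that reach zero instead of A's decrement-and-delete sweep over every key
-- (alternative data structure; same amortized cost).


-- ===== PORT A =====
-- inner loop body: summary[key] -= 1; if summary[key] == 0: del summary[key]
def mgDecKey (d : PySem.Dict String Int) (key : String) : PySem.Dict String Int :=
  let d' := d.modify key 0 (fun c => c - 1)
  if d'.getD key 0 = 0 then d'.erase key else d'

def mgStepA (k : Int) (st : PySem.Dict String Int × Int) (word : String) :
    PySem.Dict String Int × Int :=
  if st.1.contains word then (st.1.modify word 0 (fun c => c + 1), st.2)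
  else if (st.1.size : Int) < k then (st.1.insert word 1, st.2)
  else ((st.1.keys).foldl mgDecKey st.1, st.2 + 1)

def misra_gries (words : List String) (k : Int) : (List (String × Int)) × Int :=
  let st := words.foldl (mgStepA k) (PySem.Dict.empty, 0)
  let scale := PySem.Int.floordiv (words.length : Int) k
  (((st.1.keys).foldl (fun d key => d.modify key 0 (fun c => c * scale)) st.1).items, st.2)

-- ===== PORT B =====
-- state: (stored, buckets, offset); stored[w] - offset is the true count,
-- buckets maps a stored count to the set of words currently at that stored count.
-- `buckets[c].discard(word)` / `buckets.setdefault(c+1,set()).add(word)` are `modify c ∅ …`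
-- (the key is present whenever Python reads it, so the total `modify` is exact there).
def mgStepB (k : Int)
    (st : PySem.Dict String Int × PySem.Dict Int (PySem.Set String) × Int) (word : String) :
    PySem.Dict String Int × PySem.Dict Int (PySem.Set String) × Int :=
  let stored := st.1
  let buckets := st.2.1
  let off := st.2.2
  if stored.contains word then
    let c := stored.getD word 0
    let buckets := buckets.modify c PySem.Set.empty (fun s => s.discard word)
    let buckets := buckets.modify (c + 1) PySem.Set.empty (fun s => s.add word)
    (stored.insert word (c + 1), buckets, off)
  else if (stored.size : Int) < k then
    (stored.insert word (off + 1),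
     buckets.modify (off + 1) PySem.Set.empty (fun s => s.add word), off)
  else
    -- offset += 1; for w in buckets.pop(offset, set()): del stored[w]
    -- (deleting a SET of keys from a dict is independent of the set's iteration order)
    let off := off + 1
    let bucket := buckets.getD off PySem.Set.empty
    (bucket.foldl (fun d w => d.erase w) stored, buckets.erase off, off)

def misra_gries_alt (words : List String) (k : Int) : (List (String × Int)) × Int :=
  let st := words.foldl (mgStepB k) (PySem.Dict.empty, PySem.Dict.empty, 0)
  let scale := PySem.Int.floordiv (words.length : Int) k
  (st.1.items.map (fun p => (p.1, (p.2 - st.2.2) * scale)), st.2.2)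

-- ===== PRECONDITION & SPEC =====
-- A raises ZeroDivisionError at `len(words) // k` when k = 0; Pre_ excludes exactly that.
def Pre_misra_gries (words : List String) (k : Int) : Prop := k ≠ 0
instance (words : List String) (k : Int) : Decidable (Pre_misra_gries words k) := by
  unfold Pre_misra_gries; infer_instance

def pvWitness_misra_gries : List String × Int := (["a", "b", "a"], 2)

def Spec_misra_gries (words : List String) (k : Int) (out : (List (String × Int)) × Int) : Prop :=
  out = misra_gries_alt words k
instance (words : List String) (k : Int) (out : (List (String × Int)) × Int) :
    Decidable (Spec_misra_gries words k out) := by unfold Spec_misra_gries; infer_instance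

-- ===== CLAIM (what is proved, stated in full; the proofs are below) =====
def Claim_equal_misra_gries : Prop :=
  ∀ (words : List String) (k : Int), Dom_misra_gries words k → Pre_misra_gries words k →
    Spec_misra_gries words k (misra_gries words k)

-- ===== LEMMAS AND PROOFS =====

-- the value-shift linking B's stored counts to A's true counts
def mgShift (off : Int) (p : String × Int) : String × Int := (p.1, p.2 + off)

-- effect of A's decrement loop on the items list
def mgDec (l : List (String × Int)) : List (String × Int) :=
  l.filterMap (fun p => if p.2 - 1 = 0 then none else some (p.1, p.2 - 1))

-- B's bucket invariant: bucket c holds exactly the words stored with count c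
def mgInv (stored : PySem.Dict String Int) (buckets : PySem.Dict Int (PySem.Set String)) : Prop :=
  ∀ (c : Int) (w : String),
    w ∈ buckets.getD c PySem.Set.empty ↔ stored.get? w = some c

lemma find?_nodup_key (done rest : List (String × Int)) (k : String) (v : Int)
    (h : k ∉ done.map Prod.fst) :
    List.find? (fun p => p.1 == k) (done ++ (k, v) :: rest) = some (k, v) := by
  induction done with
  | nil => simp
  | cons p t ih =>
      simp only [List.map_cons, List.mem_cons] at h
      push_neg at h
      simp [Ne.symm h.1, ih h.2]

-- here began the A-side machinery (unchanged from the items-level analysis of A's loop)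
lemma filter_ne_id (rest : List (String × Int)) (k : String)
    (h : k ∉ rest.map Prod.fst) :
    rest.filter (fun p => !(p.1 == k)) = rest := by
  induction rest with
  | nil => simp
  | cons p t ih =>
      simp only [List.map_cons, List.mem_cons] at h
      push_neg at h
      rw [List.filter_cons, if_pos (by simp [Ne.symm h.1]), ih h.2]

lemma filter_ne_key (done rest : List (String × Int)) (k : String) (v : Int)
    (h1 : k ∉ done.map Prod.fst) (h2 : k ∉ rest.map Prod.fst) :
    (done ++ (k, v) :: rest).filter (fun p => !(p.1 == k)) = done ++ rest := by
  induction done with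
  | nil =>
      rw [List.nil_append, List.filter_cons, if_neg (by simp), filter_ne_id rest k h2,
        List.nil_append]
  | cons p t ih =>
      simp only [List.map_cons, List.mem_cons] at h1
      push_neg at h1
      rw [List.cons_append, List.filter_cons, if_pos (by simp [Ne.symm h1.1]), ih h1.2,
        List.cons_append]

lemma map_ite_id (rest : List (String × Int)) (k : String) (v' : Int)
    (h : k ∉ rest.map Prod.fst) :
    rest.map (fun p => if p.1 == k then (k, v') else p) = rest := by
  induction rest with
  | nil => simp
  | cons p t ih =>
      simp only [List.map_cons, List.mem_cons] at h
      push_neg at h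
      rw [List.map_cons, if_neg (by simp [Ne.symm h.1]), ih h.2]

lemma map_ite_key (done rest : List (String × Int)) (k : String) (v v' : Int)
    (h1 : k ∉ done.map Prod.fst) (h2 : k ∉ rest.map Prod.fst) :
    (done ++ (k, v) :: rest).map (fun p => if p.1 == k then (k, v') else p) =
      done ++ (k, v') :: rest := by
  induction done with
  | nil =>
      rw [List.nil_append, List.map_cons, if_pos (by simp), map_ite_id rest k v' h2,
        List.nil_append]
  | cons p t ih =>
      simp only [List.map_cons, List.mem_cons] at h1
      push_neg at h1
      rw [List.cons_append, List.map_cons, if_neg (by simp [Ne.symm h1.1]), ih h1.2,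
        List.cons_append]

lemma decAll (todo : List (String × Int)) :
    ∀ (done : List (String × Int)) (d : PySem.Dict String Int),
      d.items = done ++ todo → ((done ++ todo).map Prod.fst).Nodup →
      ((todo.map Prod.fst).foldl mgDecKey d).items = done ++ mgDec todo := by
  induction todo with
  | nil => intro done d hd _; simpa [mgDec] using hd
  | cons p t ih =>
      intro done d hd hnd
      obtain ⟨k, v⟩ := p
      have hnd' : (done.map Prod.fst ++ k :: t.map Prod.fst).Nodup := by simpa using hnd
      obtain ⟨hn1, hn2, hdisj⟩ := List.nodup_append.mp hnd'
      have hkd : k ∉ done.map Prod.fst := fun h => hdisj k h k (by simp) rfl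
      have hkt : k ∉ t.map Prod.fst := (List.nodup_cons.mp hn2).1
      have hfind : List.find? (fun q => q.1 == k) d.items = some (k, v) := by
        rw [hd]; exact find?_nodup_key done t k v hkd
      have hcont : d.contains k = true := by
        rw [PySem.Dict.contains_eq_isSome_get?]
        simp [PySem.Dict.get?, hfind]
      have hget : d.getD k 0 = v := by
        simp [PySem.Dict.getD, PySem.Dict.get?, hfind]
      have hd1 : (d.modify k 0 (fun c => c - 1)).items = done ++ (k, v - 1) :: t := by
        show (d.insert k (d.getD k 0 - 1)).items = _
        rw [PySem.Dict.items_insert_of_contains d _ hcont, hget, hd]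
        exact map_ite_key done t k v (v - 1) hkd hkt
      have hget1 : (d.modify k 0 (fun c => c - 1)).getD k 0 = v - 1 := by
        simp [PySem.Dict.getD, PySem.Dict.get?, hd1, find?_nodup_key done t k (v - 1) hkd]
      simp only [List.map_cons, List.foldl_cons]
      by_cases hz : v - 1 = 0
      · have hstep : mgDecKey d k = (d.modify k 0 (fun c => c - 1)).erase k := by
          simp [mgDecKey, hget1, hz]
        have hd2 : ((d.modify k 0 (fun c => c - 1)).erase k).items = done ++ t := by
          show ((d.modify k 0 (fun c => c - 1)).items.filter (fun p => !(p.1 == k))) = _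
          rw [hd1]; exact filter_ne_key done t k (v - 1) hkd hkt
        have hnodup2 : ((done ++ t).map Prod.fst).Nodup := by
          have hsub : (done.map Prod.fst ++ t.map Prod.fst).Sublist
              (done.map Prod.fst ++ k :: t.map Prod.fst) :=
            (List.sublist_cons_self k (t.map Prod.fst)).append_left _
          simpa using hnd'.sublist hsub
        rw [hstep, ih done _ hd2 hnodup2]
        simp [mgDec, hz]
      · have hstep : mgDecKey d k = d.modify k 0 (fun c => c - 1) := by
          simp [mgDecKey, hget1, hz]
        have hd1' : (d.modify k 0 (fun c => c - 1)).items = (done ++ [(k, v - 1)]) ++ t := by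
          rw [hd1]; simp
        have hnodup2 : (((done ++ [(k, v - 1)]) ++ t).map Prod.fst).Nodup := by
          simpa using hnd'
        rw [hstep, ih (done ++ [(k, v - 1)]) _ hd1' hnodup2]
        simp [mgDec, hz]

lemma mulAll (scale : Int) (todo : List (String × Int)) :
    ∀ (done : List (String × Int)) (d : PySem.Dict String Int),
      d.items = done ++ todo → ((done ++ todo).map Prod.fst).Nodup →
      ((todo.map Prod.fst).foldl (fun d key => d.modify key 0 (fun c => c * scale)) d).items =
        done ++ todo.map (fun p => (p.1, p.2 * scale)) := by
  induction todo with
  | nil => intro done d hd _; simpa using hd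
  | cons p t ih =>
      intro done d hd hnd
      obtain ⟨k, v⟩ := p
      have hnd' : (done.map Prod.fst ++ k :: t.map Prod.fst).Nodup := by simpa using hnd
      obtain ⟨hn1, hn2, hdisj⟩ := List.nodup_append.mp hnd'
      have hkd : k ∉ done.map Prod.fst := fun h => hdisj k h k (by simp) rfl
      have hkt : k ∉ t.map Prod.fst := (List.nodup_cons.mp hn2).1
      have hfind : List.find? (fun q => q.1 == k) d.items = some (k, v) := by
        rw [hd]; exact find?_nodup_key done t k v hkd
      have hcont : d.contains k = true := by
        rw [PySem.Dict.contains_eq_isSome_get?]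
        simp [PySem.Dict.get?, hfind]
      have hget : d.getD k 0 = v := by
        simp [PySem.Dict.getD, PySem.Dict.get?, hfind]
      have hd1 : (d.modify k 0 (fun c => c * scale)).items = (done ++ [(k, v * scale)]) ++ t := by
        show (d.insert k (d.getD k 0 * scale)).items = _
        rw [PySem.Dict.items_insert_of_contains d _ hcont, hget, hd]
        rw [map_ite_key done t k v (v * scale) hkd hkt]; simp
      have hnodup2 : ((((done ++ [(k, v * scale)]) ++ t)).map Prod.fst).Nodup := by
        simpa using hnd'
      rw [List.map_cons, List.foldl_cons, ih (done ++ [(k, v * scale)]) _ hd1 hnodup2]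
      simp

lemma mgDec_keys_sublist (l : List (String × Int)) :
    ((mgDec l).map Prod.fst).Sublist (l.map Prod.fst) := by
  induction l with
  | nil => simp [mgDec]
  | cons p t ih =>
      by_cases h : p.2 - 1 = 0
      · simpa [mgDec, h] using List.Sublist.cons p.1 ih
      · simpa [mgDec, h] using List.Sublist.cons₂ p.1 ih

lemma filter_shift (l : List (String × Int)) (off : Int) :
    (l.map (mgShift off)).filter (fun p => p.2 != off + 1) =
      (mgDec l).map (mgShift (off + 1)) := by
  induction l with
  | nil => simp [mgDec]
  | cons p t ih =>
      by_cases h : p.2 - 1 = 0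
      · have : p.2 + off = off + 1 := by omega
        simp [mgDec, mgShift, h, this, ih]
      · have : ¬ p.2 + off = off + 1 := by omega
        have hv : p.2 - 1 + (off + 1) = p.2 + off := by omega
        simp [mgDec, mgShift, h, this, ih, hv]

-- B-side: deleting a list of keys from a dict is a single filter of its items
lemma erase_fold (L : List String) (d : PySem.Dict String Int) :
    (L.foldl (fun d w => d.erase w) d).items =
      d.items.filter (fun p => !(L.contains p.1)) := by
  induction L generalizing d with
  | nil => simp
  | cons w t ih =>
      rw [List.foldl_cons, ih]
      show (d.items.filter (fun p => !(p.1 == w))).filter (fun p => !(t.contains p.1)) = _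
      rw [List.filter_filter]
      apply List.filter_congr
      intro p _
      show (!(t.contains p.1) && !(p.1 == w)) = !((w :: t).contains p.1)
      by_cases h1 : p.1 = w <;> by_cases h2 : p.1 ∈ t <;>
        simp [h1, h2]

-- B-side: find? through a key-filter (used for get? after erase, at both key types)
lemma find?_filter_ne {κ ν : Type} [BEq κ] [LawfulBEq κ] [DecidableEq κ]
    (l : List (κ × ν)) (k c : κ) :
    List.find? (fun p => p.1 == c) (l.filter (fun p => !(p.1 == k))) =
      if c = k then none else List.find? (fun p => p.1 == c) l := by
  induction l with
  | nil => simp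
  | cons p t ih =>
      rw [List.filter_cons]
      by_cases hpk : p.1 = k
      · rw [if_neg (by simp [hpk]), ih]
        by_cases hck : c = k
        · simp [hck]
        · have hpc : (p.1 == c) = false := by
            simp only [beq_eq_false_iff_ne, ne_eq, hpk]
            intro h; exact hck h.symm
          rw [if_neg hck, if_neg hck, List.find?_cons, hpc]
      · rw [if_pos (by simp [hpk])]
        by_cases hpc : p.1 = c
        · have hck : ¬ c = k := by rw [← hpc]; exact hpk
          simp [hpc, hck]
        · rw [List.find?_cons, List.find?_cons]
          have hpc' : (p.1 == c) = false := by simp [hpc]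
          rw [hpc', ih]

-- B-side: get? after erase
lemma get?_erase {κ ν : Type} [BEq κ] [LawfulBEq κ] [DecidableEq κ]
    (d : PySem.Dict κ ν) (k c : κ) :
    (d.erase k).get? c = if c = k then none else d.get? c := by
  show Option.map _ (List.find? _ (d.items.filter _)) = _
  rw [find?_filter_ne]
  by_cases hck : c = k <;> simp [hck, PySem.Dict.get?]

-- get? of a dict whose items are a value-filter of another dict's items
lemma get?_of_items_filter (d d' : PySem.Dict String Int) (q : String × Int → Bool)
    (hd : d'.items = d.items.filter q) (hnd : d.keys.Nodup) (w : String) (c : Int) :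
    (d'.get? w = some c) ↔ (d.get? w = some c ∧ q (w, c) = true) := by
  have hnd' : d'.keys.Nodup := by
    have : d'.keys.Sublist d.keys := by
      show (d'.items.map Prod.fst).Sublist (d.items.map Prod.fst)
      rw [hd]; exact List.Sublist.map _ List.filter_sublist
    exact hnd.sublist this
  rw [PySem.Dict.get?_eq_some_iff_mem_items d' w c hnd',
      PySem.Dict.get?_eq_some_iff_mem_items d w c hnd, hd, List.mem_filter]

theorem step_rel (k off : Int) (dA stored : PySem.Dict String Int)
    (buckets : PySem.Dict Int (PySem.Set String)) (w : String)
    (hsh : stored.items = dA.items.map (mgShift off))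
    (hnd : (dA.items.map Prod.fst).Nodup)
    (hinv : mgInv stored buckets) :
    (mgStepB k (stored, buckets, off) w).2.2 = (mgStepA k (dA, off) w).2 ∧
    (mgStepB k (stored, buckets, off) w).1.items =
      (mgStepA k (dA, off) w).1.items.map (mgShift (mgStepA k (dA, off) w).2) ∧
    ((mgStepA k (dA, off) w).1.items.map Prod.fst).Nodup ∧
    mgInv (mgStepB k (stored, buckets, off) w).1 (mgStepB k (stored, buckets, off) w).2.1 := by
  have hkeys : stored.keys = dA.keys := by
    show stored.items.map Prod.fst = dA.items.map Prod.fst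
    rw [hsh, List.map_map]; rfl
  have hndB : stored.keys.Nodup := by rw [hkeys]; exact hnd
  have hcont : stored.contains w = dA.contains w := by
    show (stored.items.any fun p => p.1 == w) = _
    rw [hsh, List.any_map]
    congr 1
  have hsize : stored.size = dA.size := by simp [PySem.Dict.size, hsh]
  by_cases hc : dA.contains w = true
  · cases hfind : List.find? (fun p => p.1 == w) dA.items with
    | none =>
        exfalso
        have h2 := List.find?_eq_none.mp hfind
        have hfalse : dA.contains w = false := by
          simp only [PySem.Dict.contains, List.any_eq_false]
          intro p hp
          simpa using h2 p hp
        rw [hfalse] at hc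
        exact Bool.false_ne_true hc
    | some q =>
        have hgA : dA.getD w 0 = q.2 := by
          simp [PySem.Dict.getD, PySem.Dict.get?, hfind]
        have hgB : stored.getD w 0 = q.2 + off := by
          simp only [PySem.Dict.getD, PySem.Dict.get?, hsh, List.find?_map, Option.map_map]
          rw [show ((fun (p : String × Int) => p.1 == w) ∘ mgShift off) =
              (fun (p : String × Int) => p.1 == w) from funext fun p => rfl, hfind]
          simp [mgShift]
        have hg?B : stored.get? w = some (q.2 + off) := by
          simp only [PySem.Dict.get?, hsh, List.find?_map, Option.map_map]
          rw [show ((fun (p : String × Int) => p.1 == w) ∘ mgShift off) =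
              (fun (p : String × Int) => p.1 == w) from funext fun p => rfl, hfind]
          simp [mgShift]
        have hA : mgStepA k (dA, off) w = (dA.insert w (q.2 + 1), off) := by
          show (if dA.contains w then _ else _) = _
          rw [hc]
          show (dA.insert w (dA.getD w 0 + 1), off) = _
          rw [hgA]
        set b1 := buckets.modify (q.2 + off) PySem.Set.empty (fun s => s.discard w) with hb1
        set b2 := b1.modify (q.2 + off + 1) PySem.Set.empty (fun s => s.add w) with hb2
        have hB : mgStepB k (stored, buckets, off) w =
            (stored.insert w (q.2 + off + 1), b2, off) := by
          rw [hb2, hb1]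
          simp [mgStepB, hcont, hc, hgB]
        rw [hA, hB]
        refine ⟨rfl, ?_, ?_, ?_⟩
        · show (stored.insert w (q.2 + off + 1)).items = _
          rw [PySem.Dict.items_insert_of_contains stored _ (by rw [hcont]; exact hc),
            PySem.Dict.items_insert_of_contains dA _ hc, hsh, List.map_map, List.map_map]
          apply List.map_congr_left
          intro p _
          by_cases hpw : p.1 = w
          · simp [mgShift, Function.comp, hpw, Prod.ext_iff]; omega
          · simp [mgShift, Function.comp, hpw]
        · rw [PySem.Dict.items_insert_of_contains dA _ hc, List.map_map]
          have hkeys2 : dA.items.map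
              (Prod.fst ∘ (fun p => if p.1 == w then (w, q.2 + 1) else p)) =
              dA.items.map Prod.fst := by
            apply List.map_congr_left
            intro p _
            by_cases hpw : p.1 = w <;> simp [Function.comp, hpw]
          rw [hkeys2]; exact hnd
        · -- bucket invariant after the increment branch
          intro c x
          show x ∈ b2.getD c PySem.Set.empty ↔ (stored.insert w (q.2 + off + 1)).get? x = some c
          rw [hb2, hb1]
          simp only [PySem.Dict.getD_modify, PySem.Dict.get?_insert]
          by_cases hc1 : c = q.2 + off + 1
          · rw [if_pos hc1, if_neg (show ¬ (q.2 + off + 1) = q.2 + off by omega)]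
            rw [PySem.Set.mem_add]
            rw [hinv (q.2 + off + 1) x]
            by_cases hxw : x = w
            · subst hxw; simp [hc1]
            · simp [hxw, hc1]
          · rw [if_neg hc1]
            by_cases hc2 : c = q.2 + off
            · rw [if_pos hc2, PySem.Set.mem_discard, hinv (q.2 + off) x]
              by_cases hxw : x = w
              · subst hxw
                simp only [hc2]
                constructor
                · rintro ⟨-, h⟩; exact absurd rfl h
                · intro h; exact absurd (Option.some.inj h) (by omega)
              · simp [hxw, hc2]
            · rw [if_neg hc2, hinv c x]
              by_cases hxw : x = w
              · subst hxw
                rw [hg?B, if_pos rfl]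
                constructor
                · intro h; exact absurd (Option.some.inj h) (by omega)
                · intro h; exact absurd (Option.some.inj h) (by omega)
              · rw [if_neg hxw]
  · have hc' : dA.contains w = false := by simpa using hc
    have hcB : stored.contains w = false := by rw [hcont]; exact hc'
    have hg?B : stored.get? w = none := (PySem.Dict.get?_eq_none_iff_contains stored w).mpr hcB
    have hwmem : w ∉ dA.items.map Prod.fst := by
      simp only [PySem.Dict.contains, List.any_eq_false] at hc'
      intro hmem
      obtain ⟨p, hp, hpw⟩ := List.mem_map.mp hmem
      exact hc' p hp (by simp [hpw])
    by_cases hk : (dA.size : Int) < k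
    · have hA : mgStepA k (dA, off) w = (dA.insert w 1, off) := by
        simp [mgStepA, hc', hk]
      have hB : mgStepB k (stored, buckets, off) w =
          (stored.insert w (off + 1),
           buckets.modify (off + 1) PySem.Set.empty (fun s => s.add w), off) := by
        simp [mgStepB, hcB, hsize, hk]
      rw [hA, hB]
      refine ⟨rfl, ?_, ?_, ?_⟩
      · rw [PySem.Dict.items_insert_of_not_contains stored _ hcB,
          PySem.Dict.items_insert_of_not_contains dA _ hc', hsh]
        simp [mgShift]
        omega
      · rw [PySem.Dict.items_insert_of_not_contains dA _ hc', List.map_append]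
        have hone : ([(w, (1 : Int))].map Prod.fst) = [w] := rfl
        rw [hone]
        refine List.Nodup.append hnd (List.nodup_singleton w) ?_
        intro x hx hxw
        rw [List.mem_singleton] at hxw
        exact hwmem (hxw ▸ hx)
      · intro c x
        show x ∈ (buckets.modify (off + 1) PySem.Set.empty (fun s => s.add w)).getD c
              PySem.Set.empty ↔ (stored.insert w (off + 1)).get? x = some c
        rw [PySem.Dict.getD_modify, PySem.Dict.get?_insert]
        by_cases hc1 : c = off + 1
        · rw [if_pos hc1, PySem.Set.mem_add, hinv (off + 1) x]
          by_cases hxw : x = w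
          · subst hxw; simp [hc1]
          · simp [hxw, hc1]
        · rw [if_neg hc1, hinv c x]
          by_cases hxw : x = w
          · subst hxw
            rw [hg?B, if_pos rfl]
            simp [Ne.symm hc1]
          · rw [if_neg hxw]
    · have hA : mgStepA k (dA, off) w = (dA.keys.foldl mgDecKey dA, off + 1) := by
        simp [mgStepA, hc', hk]
      have hB : mgStepB k (stored, buckets, off) w =
          ((buckets.getD (off + 1) PySem.Set.empty).foldl (fun d x => d.erase x) stored,
           buckets.erase (off + 1), off + 1) := by
        simp [mgStepB, hcB, hsize, hk]
      rw [hA, hB]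
      have hdec : ((dA.items.map Prod.fst).foldl mgDecKey dA).items = [] ++ mgDec dA.items :=
        decAll dA.items [] dA rfl (by simpa using hnd)
      have hdec' : (dA.keys.foldl mgDecKey dA).items = mgDec dA.items := by
        simpa using hdec
      -- the popped bucket's membership filter IS the value filter p.2 ≠ off+1
      have hfiltB : ((buckets.getD (off + 1) PySem.Set.empty).foldl
            (fun d x => d.erase x) stored).items =
          stored.items.filter (fun p => p.2 != off + 1) := by
        rw [erase_fold]
        apply List.filter_congr
        intro p hp
        have hget : stored.get? p.1 = some p.2 :=
          PySem.Dict.get?_of_mem_items stored hp hndB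
        have hmemiff : p.1 ∈ buckets.getD (off + 1) PySem.Set.empty ↔ p.2 = off + 1 := by
          rw [hinv (off + 1) p.1, hget]
          constructor
          · intro h; exact Option.some.inj h
          · intro h; rw [h]
        by_cases hv : p.2 = off + 1
        · have hm : p.1 ∈ buckets.getD (off + 1) PySem.Set.empty := hmemiff.mpr hv
          have hct : List.contains (buckets.getD (off + 1) PySem.Set.empty) p.1 = true := by
            simpa using hm
          rw [hct]
          simp [hv]
        · have hm : p.1 ∉ buckets.getD (off + 1) PySem.Set.empty := fun h => hv (hmemiff.mp h)
          have hct : List.contains (buckets.getD (off + 1) PySem.Set.empty) p.1 = false := by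
            simpa using hm
          rw [hct]
          simp [hv]
      refine ⟨rfl, ?_, ?_, ?_⟩
      · show ((buckets.getD (off + 1) PySem.Set.empty).foldl
            (fun d x => d.erase x) stored).items = _
        rw [hfiltB, hsh, filter_shift, hdec']
      · rw [hdec']
        exact hnd.sublist (mgDec_keys_sublist dA.items)
      · intro c x
        show x ∈ (buckets.erase (off + 1)).getD c PySem.Set.empty ↔ _
        have hgetD_erase : (buckets.erase (off + 1)).getD c PySem.Set.empty =
            if c = off + 1 then PySem.Set.empty else buckets.getD c PySem.Set.empty := by
          rw [PySem.Dict.getD_eq_get?_getD, PySem.Dict.getD_eq_get?_getD, get?_erase]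
          by_cases hck : c = off + 1 <;> simp [hck]
        rw [hgetD_erase]
        have hstored' := get?_of_items_filter stored _ (fun p => p.2 != off + 1) hfiltB
          hndB x c
        by_cases hck : c = off + 1
        · rw [if_pos hck]
          constructor
          · intro h; exact absurd h (by simp [PySem.Set.empty])
          · intro h
            rw [hstored'] at h
            exact absurd hck (by simpa using h.2)
        · rw [if_neg hck, hinv c x, hstored']
          constructor
          · intro h; exact ⟨h, by simpa using hck⟩
          · intro h; exact h.1

theorem loop_rel (words : List String) :
    ∀ (k off : Int) (dA stored : PySem.Dict String Int)
      (buckets : PySem.Dict Int (PySem.Set String)),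
      stored.items = dA.items.map (mgShift off) → (dA.items.map Prod.fst).Nodup →
      mgInv stored buckets →
      (words.foldl (mgStepB k) (stored, buckets, off)).2.2 =
        (words.foldl (mgStepA k) (dA, off)).2 ∧
      (words.foldl (mgStepB k) (stored, buckets, off)).1.items =
        (words.foldl (mgStepA k) (dA, off)).1.items.map
          (mgShift ((words.foldl (mgStepA k) (dA, off)).2)) ∧
      ((words.foldl (mgStepA k) (dA, off)).1.items.map Prod.fst).Nodup := by
  induction words with
  | nil => intro k off dA stored buckets hsh hnd _; exact ⟨rfl, hsh, hnd⟩
  | cons w t ih =>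
      intro k off dA stored buckets hsh hnd hinv
      obtain ⟨h2, h1, hn, hi⟩ := step_rel k off dA stored buckets w hsh hnd hinv
      have := ih k (mgStepA k (dA, off) w).2 (mgStepA k (dA, off) w).1
        (mgStepB k (stored, buckets, off) w).1
        (mgStepB k (stored, buckets, off) w).2.1 (by rw [h1]) hn hi
      have hp : ((mgStepB k (stored, buckets, off) w).1,
          (mgStepB k (stored, buckets, off) w).2.1, (mgStepA k (dA, off) w).2) =
          mgStepB k (stored, buckets, off) w := by rw [← h2]
      rw [hp] at this
      simpa [List.foldl_cons] using this

-- ===== VERDICT (by name: the statement is the Claim_ definition above) =====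
theorem misra_gries_spec : Claim_equal_misra_gries := by
  intro words k _ _
  obtain ⟨h2, h1, hn⟩ := loop_rel words k 0 PySem.Dict.empty PySem.Dict.empty PySem.Dict.empty
    rfl (by simp [PySem.Dict.empty])
    (by intro c x; simp [PySem.Dict.getD_empty, PySem.Dict.get?_empty, PySem.Set.empty])
  have hmul := mulAll (PySem.Int.floordiv (words.length : Int) k)
      (words.foldl (mgStepA k) (PySem.Dict.empty, 0)).1.items []
      (words.foldl (mgStepA k) (PySem.Dict.empty, 0)).1 rfl (by simpa using hn)
  unfold Spec_misra_gries misra_gries misra_gries_alt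
  refine Prod.ext ?_ h2.symm
  show ((words.foldl (mgStepA k) (PySem.Dict.empty, 0)).1.keys.foldl
        (fun d key => d.modify key 0
          (fun c => c * PySem.Int.floordiv (words.length : Int) k))
        (words.foldl (mgStepA k) (PySem.Dict.empty, 0)).1).items
      = (words.foldl (mgStepB k) (PySem.Dict.empty, PySem.Dict.empty, 0)).1.items.map
          (fun p => (p.1,
            (p.2 - (words.foldl (mgStepB k) (PySem.Dict.empty, PySem.Dict.empty, 0)).2.2) *
              PySem.Int.floordiv (words.length : Int) k))
  rw [h1, h2, show (words.foldl (mgStepA k) (PySem.Dict.empty, 0)).1.keys =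
      (words.foldl (mgStepA k) (PySem.Dict.empty, 0)).1.items.map Prod.fst from rfl, hmul]
  simp [mgShift, List.map_map, Function.comp]
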